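-- pv_equiv track=rewrite | github.com/yffbit/PolyominoSolver | parse_solution.py | get_index_form1
-- ===== SOURCE A (Python) =====
-- def rc2idx(i, j, col):
--     return i * col + j
--
-- def get_index_form1(index, shape):
--     # 如果原坐标为(i,j),那么转换之后一共16个坐标
--     # (2*i,2*j),(2*i,2*j+1),(2*i,2*j+2),(2*i,2*j+3)
--     # (2*i+1,2*j),(2*i+1,2*j+1),(2*i+1,2*j+2),(2*i+1,2*j+3)
--     # (2*i+2,2*j),(2*i+2,2*j+1),(2*i+2,2*j+2),(2*i+2,2*j+3)
--     # (2*i+3,2*j),(2*i+3,2*j+1),(2*i+3,2*j+2),(2*i+3,2*j+3)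
--     # 除以2得到
--     # (i,j),(i,j),(i,j+1),(i,j+1)
--     # (i,j),(i,j),(i,j+1),(i,j+1)
--     # (i+1,j),(i+1,j),(i+1,j+1),(i+1,j+1)
--     # (i+1,j),(i+1,j),(i+1,j+1),(i+1,j+1)
--     # 两个相邻的坐标(i,j),(i,j+1)转换之后会重复8个坐标
--     # 对于变换后的每一个坐标(r,c),判断其他15个坐标存不存在,如果都存在,
--     # 说明这16个坐标完全覆盖了一个格子,或者覆盖了两个相邻格子的部分
--     # 将(r/2,c/2)加入集合
--     M, N = shape
--     M1, N1 = M//2-1, N//2-1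
--     index1 = []
--     for idx in index:
--         temp = set(idx)
--         coord_set = set()
--         for i in idx:
--             flag = True
--             for j in range(i, i+4*N, N):
--                 if j not in temp or j+1 not in temp or j+2 not in temp or j+3 not in temp:
--                     flag = False
--             if flag:
--                 coord_set.add(((i//N)//2, (i%N)//2))
--         temp = sorted([rc2idx(r, c, N1) for r,c in coord_set])
--         if temp:
--             index1.append(temp)
--     return index1, (M1, N1)
-- ===== SOURCE B (Python) =====
-- def rc2idx(i, j, col):
--     return i * col + j
--
-- def get_index_form1(index, shape):
--     # Shift-and-intersect: horizontal 4-runs as an intersection of shifted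
--     # copies of the cell set, then blocks as an intersection of row-shifted
--     # copies of the run set; no per-coordinate membership scan.
--     M, N = shape
--     M1, N1 = M // 2 - 1, N // 2 - 1
--     index1 = []
--     for idx in index:
--         cells = set(idx)
--         runs = cells & {x - 1 for x in cells} & {x - 2 for x in cells} & {x - 3 for x in cells}
--         anchors = runs & {x - N for x in runs} & {x - 2 * N for x in runs} & {x - 3 * N for x in runs}
--         blocks = {((i // N) // 2, (i % N) // 2) for i in anchors}
--         cells2 = sorted(rc2idx(r, c, N1) for r, c in blocks)
--         if cells2:
--             index1.append(cells2)
--     return index1, (M1, N1)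
-- ===== Notes on version B (the rewrite author's own statement) =====
-- stated objective: alternative
-- what changed: Replaces A's per-coordinate nested 4x4 membership scan (a range() loop of four quadruple set lookups per coordinate) by set algebra: horizontal 4-runs are the intersection of the cell set with its shifts by 1,2,3, and full-block anchors are the intersection of that run set with its shifts by N,2N,3N; anchors are then mapped to block coordinates wholesale.
import Mathlib
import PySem

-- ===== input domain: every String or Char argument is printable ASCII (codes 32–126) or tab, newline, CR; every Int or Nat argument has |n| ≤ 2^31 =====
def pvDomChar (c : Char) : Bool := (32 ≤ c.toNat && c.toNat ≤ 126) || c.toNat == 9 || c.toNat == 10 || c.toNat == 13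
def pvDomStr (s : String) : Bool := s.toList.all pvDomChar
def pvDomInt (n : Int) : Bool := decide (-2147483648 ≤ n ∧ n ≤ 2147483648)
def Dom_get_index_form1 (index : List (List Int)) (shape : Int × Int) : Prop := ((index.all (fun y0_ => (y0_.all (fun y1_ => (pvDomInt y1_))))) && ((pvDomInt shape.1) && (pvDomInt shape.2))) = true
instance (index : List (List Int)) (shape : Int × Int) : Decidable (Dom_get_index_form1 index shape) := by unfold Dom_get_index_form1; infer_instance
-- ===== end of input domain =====

-- B replaces A's per-coordinate nested 4x4 membership scan by set algebra: runs = cells ∩ its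
-- shifts by 1,2,3; anchors = runs ∩ its shifts by N,2N,3N; anchors are mapped to blocks wholesale.

-- ===== PORT A =====
def rc2idx (i j col : Int) : Int := i * col + j

def get_index_form1 (index : List (List Int)) (shape : Int × Int) : List (List Int) × (Int × Int) :=
  let N := shape.2
  let M1 := PySem.Int.floordiv shape.1 2 - 1
  let N1 := PySem.Int.floordiv N 2 - 1
  let index1 := index.foldl (fun index1 idx =>
    let temp : PySem.Set Int := PySem.Set.ofList idx
    let coord_set : PySem.Set (Int × Int) := idx.foldl (fun cs i =>
      let flag := (PySem.List.pyRange i (i + 4 * N) N).foldl (fun flag j =>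
        if !(PySem.Set.contains temp j) || !(PySem.Set.contains temp (j+1)) ||
           !(PySem.Set.contains temp (j+2)) || !(PySem.Set.contains temp (j+3)) then false else flag) true
      if flag then
        PySem.Set.add cs (PySem.Int.floordiv (PySem.Int.floordiv i N) 2,
                          PySem.Int.floordiv (PySem.Int.mod i N) 2)
      else cs) PySem.Set.empty
    -- Python iterates the set coord_set in hash order, but sorted(...) of the mapped
    -- ints depends only on the multiset, so folding in insertion order is exact.
    let temp2 := PySem.List.sorted (coord_set.map (fun rc => rc2idx rc.1 rc.2 N1)) (fun x => x) false
    if temp2 ≠ [] then index1 ++ [temp2] else index1) []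
  (index1, (M1, N1))

-- ===== PORT B =====
def get_index_form1_alt (index : List (List Int)) (shape : Int × Int) : List (List Int) × (Int × Int) :=
  let N := shape.2
  let M1 := PySem.Int.floordiv shape.1 2 - 1
  let N1 := PySem.Int.floordiv N 2 - 1
  let index1 := index.foldl (fun index1 idx =>
    let cells : PySem.Set Int := PySem.Set.ofList idx
    -- runs = cells & {x-1 for x in cells} & {x-2 …} & {x-3 …}  (shifted sets, consumed as sets)
    let runs : PySem.Set Int :=
      PySem.Set.inter (PySem.Set.inter (PySem.Set.inter cells
        (PySem.Set.ofList (cells.map (fun x => x - 1))))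
        (PySem.Set.ofList (cells.map (fun x => x - 2))))
        (PySem.Set.ofList (cells.map (fun x => x - 3)))
    -- anchors = runs & {x-N for x in runs} & {x-2N …} & {x-3N …}
    let anchors : PySem.Set Int :=
      PySem.Set.inter (PySem.Set.inter (PySem.Set.inter runs
        (PySem.Set.ofList (runs.map (fun x => x - N))))
        (PySem.Set.ofList (runs.map (fun x => x - 2 * N))))
        (PySem.Set.ofList (runs.map (fun x => x - 3 * N)))
    -- blocks = {((i//N)//2, (i%N)//2) for i in anchors}  (a set built from a set: order-safe)
    let blocks : PySem.Set (Int × Int) :=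
      PySem.Set.ofList (anchors.map (fun i =>
        (PySem.Int.floordiv (PySem.Int.floordiv i N) 2, PySem.Int.floordiv (PySem.Int.mod i N) 2)))
    let cells2 := PySem.List.sorted (blocks.map (fun rc => rc2idx rc.1 rc.2 N1)) (fun x => x) false
    if cells2 ≠ [] then index1 ++ [cells2] else index1) []
  (index1, (M1, N1))

-- ===== PRECONDITION & SPEC =====
-- Pre_ excludes only inputs on which A raises: with shape.2 = 0 and any nonempty
-- coordinate list, A's range(i, i, 0) raises ValueError.
def Pre_get_index_form1 (index : List (List Int)) (shape : Int × Int) : Prop :=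
  shape.2 ≠ 0 ∨ index.all (fun l => l.isEmpty) = true
instance (index : List (List Int)) (shape : Int × Int) : Decidable (Pre_get_index_form1 index shape) := by unfold Pre_get_index_form1; infer_instance

def pvWitness_get_index_form1 : List (List Int) × (Int × Int) := ([[0, 1, 2, 3]], (2, 4))

def Spec_get_index_form1 (index : List (List Int)) (shape : Int × Int) (out : List (List Int) × (Int × Int)) : Prop := out = get_index_form1_alt index shape
instance (index : List (List Int)) (shape : Int × Int) (out : List (List Int) × (Int × Int)) : Decidable (Spec_get_index_form1 index shape out) := by unfold Spec_get_index_form1; infer_instance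

-- ===== CLAIM (what is proved, stated in full; the proofs are below) =====
def Claim_equal_get_index_form1 : Prop := ∀ (index : List (List Int)) (shape : Int × Int), Dom_get_index_form1 index shape → Pre_get_index_form1 index shape → Spec_get_index_form1 index shape (get_index_form1 index shape)

-- ===== LEMMAS AND PROOFS =====

theorem ediv5 (m : Int) (hm : 0 < m) : (5*m-1)/m = 4 := by
  rw [show 5*m-1 = (m-1)+4*m by ring, Int.add_mul_ediv_right _ _ (ne_of_gt hm),
      Int.ediv_eq_zero_of_lt (by omega) (by omega)]
  ring

-- range(i, i+4*N, N) for N ≠ 0 is exactly the four row starts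
theorem pyRange_four (i N : Int) (h : N ≠ 0) :
    PySem.List.pyRange i (i + 4 * N) N = [i, i + N, i + 2 * N, i + 3 * N] := by
  rcases lt_or_gt_of_ne h with hn | hp
  · unfold PySem.List.pyRange
    have h1 : ¬ (0 < N) := by omega
    have h2 : i + 4*N < i := by omega
    simp only [if_neg h, if_neg h1, if_pos h2]
    rw [show i - (i + 4 * N) + -N - 1 = 5*(-N)-1 by ring, ediv5 (-N) (by omega)]
    simp [List.range_succ]
    and_intros <;> ring
  · unfold PySem.List.pyRange
    have h2 : i < i + 4*N := by omega
    simp only [if_neg h, if_pos hp, if_pos h2]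
    rw [show i + 4 * N - i + N - 1 = 5*N-1 by ring, ediv5 N hp]
    simp [List.range_succ]
    and_intros <;> ring

-- A's flag loop (no break) is the conjunction of the per-row conditions
theorem flag_foldl (l : List Int) (p : Int → Bool) (b : Bool) :
    l.foldl (fun flag j => if p j then false else flag) b = (b && l.all (fun j => !p j)) := by
  induction l generalizing b with
  | nil => simp
  | cons x xs ih => simp only [List.foldl, List.all_cons, ih]; cases p x <;> simp

-- membership in A's conditional accumulation loop
theorem mem_foldl_add_if {α β : Type} [BEq α] [LawfulBEq α]
    (l : List β) (c : β → Bool) (f : β → α) (s : PySem.Set α) (y : α) :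
    (y ∈ l.foldl (fun cs i => if c i then PySem.Set.add cs (f i) else cs) s) ↔
      (y ∈ s ∨ ∃ i ∈ l, c i = true ∧ y = f i) := by
  induction l generalizing s with
  | nil => simp
  | cons x xs ih =>
    simp only [List.foldl]
    by_cases hx : c x = true
    · rw [if_pos hx, ih]
      simp only [PySem.Set.mem_add, List.mem_cons]
      constructor
      · rintro (h | ⟨i, hi, hci, rfl⟩)
        · rcases h with h | rfl
          · exact Or.inl h
          · exact Or.inr ⟨x, Or.inl rfl, hx, rfl⟩
        · exact Or.inr ⟨i, Or.inr hi, hci, rfl⟩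
      · rintro (h | ⟨i, hi, hci, rfl⟩)
        · exact Or.inl (Or.inl h)
        · rcases hi with rfl | hi
          · exact Or.inl (Or.inr rfl)
          · exact Or.inr ⟨i, hi, hci, rfl⟩
    · rw [if_neg hx, ih]
      simp only [List.mem_cons]
      constructor
      · rintro (h | ⟨i, hi, hci, rfl⟩)
        · exact Or.inl h
        · exact Or.inr ⟨i, Or.inr hi, hci, rfl⟩
      · rintro (h | ⟨i, hi, hci, rfl⟩)
        · exact Or.inl h
        · rcases hi with rfl | hi
          · exact absurd hci hx
          · exact Or.inr ⟨i, hi, hci, rfl⟩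

-- A's conditional accumulation loop yields a duplicate-free list
theorem nodup_foldl_add_if {α β : Type} [BEq α] [LawfulBEq α]
    (l : List β) (c : β → Bool) (f : β → α) (s : PySem.Set α) (hs : s.Nodup) :
    (l.foldl (fun cs i => if c i then PySem.Set.add cs (f i) else cs) s).Nodup := by
  induction l generalizing s with
  | nil => exact hs
  | cons x xs ih =>
    simp only [List.foldl]
    split
    · exact ih _ (PySem.Set.nodup_add _ _ hs)
    · exact ih _ hs

-- membership in a shifted copy of a set
theorem mem_shift (s : List Int) (d y : Int) :
    (y ∈ PySem.Set.ofList (s.map (fun x => x - d))) ↔ y + d ∈ s := by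
  rw [PySem.Set.mem_ofList, List.mem_map]
  constructor
  · rintro ⟨x, hx, rfl⟩; simpa using hx
  · intro h; exact ⟨y + d, h, by ring⟩

-- the per-piece bodies of the two folds agree (N ≠ 0)
theorem piece_eq (N N1 : Int) (hN : N ≠ 0) (acc : List (List Int)) (idx : List Int) :
    (let temp : PySem.Set Int := PySem.Set.ofList idx
     let coord_set : PySem.Set (Int × Int) := idx.foldl (fun cs i =>
       let flag := (PySem.List.pyRange i (i + 4 * N) N).foldl (fun flag j =>
         if !(PySem.Set.contains temp j) || !(PySem.Set.contains temp (j+1)) ||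
            !(PySem.Set.contains temp (j+2)) || !(PySem.Set.contains temp (j+3)) then false else flag) true
       if flag then
         PySem.Set.add cs (PySem.Int.floordiv (PySem.Int.floordiv i N) 2,
                           PySem.Int.floordiv (PySem.Int.mod i N) 2)
       else cs) PySem.Set.empty
     let temp2 := PySem.List.sorted (coord_set.map (fun rc => rc2idx rc.1 rc.2 N1)) (fun x => x) false
     if temp2 ≠ [] then acc ++ [temp2] else acc)
    =
    (let cells : PySem.Set Int := PySem.Set.ofList idx
     let runs : PySem.Set Int :=
       PySem.Set.inter (PySem.Set.inter (PySem.Set.inter cells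
         (PySem.Set.ofList (cells.map (fun x => x - 1))))
         (PySem.Set.ofList (cells.map (fun x => x - 2))))
         (PySem.Set.ofList (cells.map (fun x => x - 3)))
     let anchors : PySem.Set Int :=
       PySem.Set.inter (PySem.Set.inter (PySem.Set.inter runs
         (PySem.Set.ofList (runs.map (fun x => x - N))))
         (PySem.Set.ofList (runs.map (fun x => x - 2 * N))))
         (PySem.Set.ofList (runs.map (fun x => x - 3 * N)))
     let blocks : PySem.Set (Int × Int) :=
       PySem.Set.ofList (anchors.map (fun i =>
         (PySem.Int.floordiv (PySem.Int.floordiv i N) 2, PySem.Int.floordiv (PySem.Int.mod i N) 2)))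
     let cells2 := PySem.List.sorted (blocks.map (fun rc => rc2idx rc.1 rc.2 N1)) (fun x => x) false
     if cells2 ≠ [] then acc ++ [cells2] else acc) := by
  dsimp only
  set runs : PySem.Set Int :=
    PySem.Set.inter (PySem.Set.inter (PySem.Set.inter (PySem.Set.ofList idx)
      (PySem.Set.ofList ((PySem.Set.ofList idx).map (fun x => x - 1))))
      (PySem.Set.ofList ((PySem.Set.ofList idx).map (fun x => x - 2))))
      (PySem.Set.ofList ((PySem.Set.ofList idx).map (fun x => x - 3))) with hruns
  set anchors : PySem.Set Int :=
    PySem.Set.inter (PySem.Set.inter (PySem.Set.inter runs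
      (PySem.Set.ofList (runs.map (fun x => x - N))))
      (PySem.Set.ofList (runs.map (fun x => x - 2 * N))))
      (PySem.Set.ofList (runs.map (fun x => x - 3 * N))) with hanchors
  have hrun_mem : ∀ y : Int, y ∈ runs ↔ (y ∈ idx ∧ y + 1 ∈ idx ∧ y + 2 ∈ idx ∧ y + 3 ∈ idx) := by
    intro y
    rw [hruns]
    simp only [PySem.Set.mem_inter, mem_shift]
    simp only [PySem.Set.mem_ofList]
    tauto
  have hanc_mem : ∀ y : Int, y ∈ anchors ↔ (y ∈ runs ∧ y + N ∈ runs ∧ y + 2 * N ∈ runs ∧ y + 3 * N ∈ runs) := by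
    intro y
    rw [hanchors]
    simp only [PySem.Set.mem_inter, mem_shift]
    tauto
  have hflag : ∀ i : Int,
      (((PySem.List.pyRange i (i + 4 * N) N).foldl (fun flag j =>
         if !(PySem.Set.contains (PySem.Set.ofList idx) j) || !(PySem.Set.contains (PySem.Set.ofList idx) (j+1)) ||
            !(PySem.Set.contains (PySem.Set.ofList idx) (j+2)) || !(PySem.Set.contains (PySem.Set.ofList idx) (j+3)) then false else flag) true) = true)
      ↔ i ∈ anchors := by
    intro i
    rw [pyRange_four i N hN, flag_foldl]
    simp only [List.all_cons, List.all_nil, Bool.and_true, Bool.true_and, Bool.not_or,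
      Bool.not_not, Bool.and_eq_true, PySem.Set.contains_iff, PySem.Set.mem_ofList]
    simp only [hanc_mem, hrun_mem]
    tauto
  have key : PySem.List.sorted ((idx.foldl (fun cs i =>
       if (PySem.List.pyRange i (i + 4 * N) N).foldl (fun flag j =>
         if !(PySem.Set.contains (PySem.Set.ofList idx) j) || !(PySem.Set.contains (PySem.Set.ofList idx) (j+1)) ||
            !(PySem.Set.contains (PySem.Set.ofList idx) (j+2)) || !(PySem.Set.contains (PySem.Set.ofList idx) (j+3)) then false else flag) true
       then
         PySem.Set.add cs (PySem.Int.floordiv (PySem.Int.floordiv i N) 2,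
                           PySem.Int.floordiv (PySem.Int.mod i N) 2)
       else cs) PySem.Set.empty).map (fun rc => rc2idx rc.1 rc.2 N1)) (fun x => x) false
      = PySem.List.sorted ((PySem.Set.ofList (anchors.map (fun i =>
         (PySem.Int.floordiv (PySem.Int.floordiv i N) 2, PySem.Int.floordiv (PySem.Int.mod i N) 2)))).map
           (fun rc => rc2idx rc.1 rc.2 N1)) (fun x => x) false := by
    rw [PySem.List.sorted_id_eq_sorted_id_iff_perm]
    refine List.Perm.map _ ((List.perm_ext_iff_of_nodup
      (nodup_foldl_add_if _ _ _ _ List.nodup_nil) (PySem.Set.nodup_ofList _)).mpr ?_)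
    intro p
    rw [mem_foldl_add_if]
    simp only [PySem.Set.mem_ofList, List.mem_map, List.not_mem_nil, false_or]
    constructor
    · rintro ⟨i, hi, hc, rfl⟩
      exact ⟨i, (hflag i).mp hc, rfl⟩
    · rintro ⟨i, hi, rfl⟩
      exact ⟨i, ((hrun_mem i).mp ((hanc_mem i).mp hi).1).1, (hflag i).mpr hi, rfl⟩
  rw [key]

theorem main_eq : ∀ (index : List (List Int)) (shape : Int × Int),
    (shape.2 ≠ 0 ∨ index.all (fun l => l.isEmpty) = true) →
    get_index_form1 index shape = get_index_form1_alt index shape := by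
  intro index shape hpre
  simp only [get_index_form1, get_index_form1_alt]
  congr 1
  apply PySem.List.foldl_congr_mem
  intro acc idx hmem
  by_cases hN : shape.2 = 0
  · have : idx = [] := by
      rcases hpre with h | hall
      · exact absurd hN h
      · have := List.all_eq_true.mp hall idx hmem
        simpa using this
    subst this
    rfl
  · exact piece_eq shape.2 (PySem.Int.floordiv shape.2 2 - 1) hN acc idx

-- ===== VERDICT (by name: the statement is the Claim_ definition above) =====
theorem get_index_form1_spec : Claim_equal_get_index_form1 := by
  intro index shape _ hpre
  unfold Spec_get_index_form1
  exact main_eq index shape hpre
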